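-- pv_equiv track=rewrite | github.com/sergey-sh/txt2srt | txt2srt.py | transcribe_txt_file_to_structured_iter
-- ===== SOURCE A (Python) =====
-- LAST_MESSAGE_TIME = 5*60
--
-- def str2seconds(value):
--     values = value.split(':')
--
--     if not values[-1].isdigit():
--         return None
--
--     s = int(values[-1]) if len(values) > 0 and values[-1].isdigit() else 0
--     m = int(values[-2]) if len(values) > 1 and values[-2].isdigit() else 0
--     h = int(values[-3]) if len(values) > 2 and values[-3].isdigit() else 0
--
--     return (h * 60 + m) * 60 + s
--
-- def transcribe_txt_file_to_structured_iter(file_input):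
--     in_block = False
--     time_start = None
--     lines = None
--     for line in file_input:
--         line = line.rstrip()
--         if in_block:
--             if line == '':
--                 in_block = False
--             else:
--                 lines.append(line)
--             continue
--
--         time_current = str2seconds(line)
--         if time_current is None:
--             continue
--
--         if time_start is not None:
--             yield time_start, time_current, lines
--         time_start = time_current
--         lines = []
--         in_block = True
--
--     if time_start is not None and lines:
--         yield time_start, time_start + LAST_MESSAGE_TIME, lines
-- ===== SOURCE B (Python) =====
-- LAST_MESSAGE_TIME = 5*60
--
-- def str2seconds(value):
--     values = value.split(':')
--
--     if not values[-1].isdigit():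
--         return None
--
--     s = int(values[-1]) if len(values) > 0 and values[-1].isdigit() else 0
--     m = int(values[-2]) if len(values) > 1 and values[-2].isdigit() else 0
--     h = int(values[-3]) if len(values) > 2 and values[-3].isdigit() else 0
--
--     return (h * 60 + m) * 60 + s
--
-- def transcribe_txt_file_to_structured_iter(file_input):
--     # Pass 1: cut the input into (start_time, block_lines) records.
--     stripped = [l.rstrip() for l in file_input]
--     records = []
--     i, n = 0, len(stripped)
--     while i < n:
--         t = str2seconds(stripped[i])
--         i += 1
--         if t is None:
--             continue
--         block = []
--         while i < n and stripped[i] != '':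
--             block.append(stripped[i])
--             i += 1
--         records.append((t, block))
--     # Pass 2: each record's window ends where the next one starts.
--     for (t, blk), (t2, _) in zip(records, records[1:]):
--         yield t, t2, blk
--     if records:
--         t, blk = records[-1]
--         if blk:
--             yield t, t + LAST_MESSAGE_TIME, blk
-- ===== Notes on version B (the rewrite author's own statement) =====
-- stated objective: alternative
-- what changed: B replaces A's single-pass generator with mutable in_block/time_start/lines state by two passes: pass 1 cuts the (pre-rstripped) input into (start_time, block_lines) records with a nested block-consuming loop, pass 2 zips consecutive records to compute each subtitle's time window.
import Mathlib
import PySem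

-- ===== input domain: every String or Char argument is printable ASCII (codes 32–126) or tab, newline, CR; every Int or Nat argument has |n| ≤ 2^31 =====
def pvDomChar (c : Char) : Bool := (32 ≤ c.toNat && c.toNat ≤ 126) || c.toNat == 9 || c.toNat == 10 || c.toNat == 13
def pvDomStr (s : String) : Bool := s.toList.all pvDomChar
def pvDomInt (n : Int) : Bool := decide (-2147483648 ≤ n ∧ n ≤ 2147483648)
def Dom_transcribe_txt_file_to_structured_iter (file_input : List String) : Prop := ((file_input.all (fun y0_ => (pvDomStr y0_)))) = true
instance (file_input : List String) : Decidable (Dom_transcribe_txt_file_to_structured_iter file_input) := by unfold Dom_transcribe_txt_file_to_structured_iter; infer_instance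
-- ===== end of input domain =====

-- B restructures A's one-pass generator into two passes (segmentation into records, then pairing
-- consecutive records for the time windows); same return values (objective: alternative decomposition).

-- ===== PORT A =====
-- shared helper: str2seconds is identical in Source A and Source B (ported once, used by both ports)
def pv_str2seconds (value : String) : Option Int :=
  let values := (PySem.Str.split? value ":").getD []
  if ¬ (PySem.Str.strIsdigit ((PySem.List.pyGet? values (-1)).getD "") = true) then none
  else
    let s : Int := if values.length > 0 ∧ PySem.Str.strIsdigit ((PySem.List.pyGet? values (-1)).getD "") = true
                   then (PySem.Int.ofStr? ((PySem.List.pyGet? values (-1)).getD "")).getD 0 else 0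
    let m : Int := if values.length > 1 ∧ PySem.Str.strIsdigit ((PySem.List.pyGet? values (-2)).getD "") = true
                   then (PySem.Int.ofStr? ((PySem.List.pyGet? values (-2)).getD "")).getD 0 else 0
    let h : Int := if values.length > 2 ∧ PySem.Str.strIsdigit ((PySem.List.pyGet? values (-3)).getD "") = true
                   then (PySem.Int.ofStr? ((PySem.List.pyGet? values (-3)).getD "")).getD 0 else 0
    some ((h * 60 + m) * 60 + s)

-- A's loop body after 'line = line.rstrip()' (state: in_block, time_start, lines, yielded-so-far)
def pvStripStep
    (s : Bool × Option Int × List String × List (Int × Int × List String)) (line : String) :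
    Bool × Option Int × List String × List (Int × Int × List String) :=
  match s with
  | (in_block, time_start, lines, out) =>
    if in_block then
      if line = "" then (false, time_start, lines, out)
      else (true, time_start, lines ++ [line], out)
    else
      match pv_str2seconds line with
      | none => (in_block, time_start, lines, out)
      | some tc =>
        (true, some tc, [],
          match time_start with
          | some ts => out ++ [(ts, tc, lines)]
          | none => out)

def pvStepA
    (s : Bool × Option Int × List String × List (Int × Int × List String)) (line0 : String) :
    Bool × Option Int × List String × List (Int × Int × List String) :=
  pvStripStep s (PySem.Str.rstrip line0)

-- the final 'if time_start is not None and lines: yield …' (lines is [] whenever time_start is None)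
def pvFinal (s : Bool × Option Int × List String × List (Int × Int × List String)) :
    List (Int × Int × List String) :=
  match s with
  | (_, some ts, lines, out) => if lines = [] then out else out ++ [(ts, ts + 5*60, lines)]
  | (_, none, _, out) => out

def transcribe_txt_file_to_structured_iter (file_input : List String) :
    List (Int × Int × List String) :=
  pvFinal (file_input.foldl pvStepA (false, none, [], []))

-- ===== PORT B =====
-- pass 1 of Source B: the index loop collecting (start_time, block) records
def pvRecords : List String → List (Int × List String)
  | [] => []
  | l :: rest =>
    match pv_str2seconds l with
    | none => pvRecords rest
    | some t =>
      let block := rest.takeWhile (fun x => x ≠ "")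
      (t, block) :: pvRecords (rest.drop block.length)
termination_by ls => ls.length
decreasing_by
  · simp
  · have h := (List.takeWhile_sublist (l := rest) (fun x => x ≠ "")).length_le
    simp only [List.length_drop, List.length_cons]
    omega

def transcribe_txt_file_to_structured_iter_alt (file_input : List String) :
    List (Int × Int × List String) :=
  let stripped := file_input.map PySem.Str.rstrip
  let records := pvRecords stripped
  let mid := (records.zip (records.drop 1)).map (fun p => (p.1.1, p.2.1, p.1.2))
  match records.getLast? with
  | some (t, blk) => if blk = [] then mid else mid ++ [(t, t + 5*60, blk)]
  | none => mid

-- ===== PRECONDITION & SPEC =====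
def Spec_transcribe_txt_file_to_structured_iter (file_input : List String) (out : List (Int × Int × List String)) : Prop := out = transcribe_txt_file_to_structured_iter_alt file_input
instance (file_input : List String) (out : List (Int × Int × List String)) : Decidable (Spec_transcribe_txt_file_to_structured_iter file_input out) := by unfold Spec_transcribe_txt_file_to_structured_iter; infer_instance

-- ===== CLAIM (what is proved, stated in full; the proofs are below) =====
def Claim_equal_transcribe_txt_file_to_structured_iter : Prop := ∀ (file_input : List String), Dom_transcribe_txt_file_to_structured_iter file_input → Spec_transcribe_txt_file_to_structured_iter file_input (transcribe_txt_file_to_structured_iter file_input)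

-- ===== LEMMAS AND PROOFS =====

-- pairing consecutive records plus the trailing 5-minute block, as one recursion
def pvFinish : List (Int × List String) → List (Int × Int × List String)
  | [] => []
  | [(t, blk)] => if blk = [] then [] else [(t, t + 5*60, blk)]
  | (t, blk) :: (t2, blk2) :: r => (t, t2, blk) :: pvFinish ((t2, blk2) :: r)

lemma pvRecords_nil : pvRecords [] = [] := by rw [pvRecords.eq_def]

lemma pvRecords_cons_none (l : String) (ls : List String) (h : pv_str2seconds l = none) :
    pvRecords (l :: ls) = pvRecords ls := by
  rw [pvRecords.eq_def]; simp [h]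

lemma pvRecords_cons_some (l : String) (ls : List String) (t : Int)
    (h : pv_str2seconds l = some t) :
    pvRecords (l :: ls) =
      (t, ls.takeWhile (fun x => x ≠ "")) ::
        pvRecords (ls.drop (ls.takeWhile (fun x => x ≠ "")).length) := by
  rw [pvRecords.eq_def]; simp [h]

-- pass 2 of B computes pvFinish
lemma alt_assemble_eq (recs : List (Int × List String)) :
    (match recs.getLast? with
     | some (t, blk) =>
         if blk = [] then (recs.zip (recs.drop 1)).map (fun p => (p.1.1, p.2.1, p.1.2))
         else (recs.zip (recs.drop 1)).map (fun p => (p.1.1, p.2.1, p.1.2)) ++ [(t, t + 5*60, blk)]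
     | none => (recs.zip (recs.drop 1)).map (fun p => (p.1.1, p.2.1, p.1.2)))
    = pvFinish recs := by
  match recs with
  | [] => rfl
  | [(t, blk)] => simp [pvFinish]
  | (t, blk) :: (t2, blk2) :: r =>
    have ih := alt_assemble_eq ((t2, blk2) :: r)
    simp only [List.getLast?_cons_cons, List.drop_succ_cons, List.drop_zero, List.zip_cons_cons,
      List.map_cons, pvFinish] at ih ⊢
    cases h : ((t2, blk2) :: r).getLast? with
    | none => simp at h
    | some p =>
      rcases p with ⟨tl, bl⟩
      rw [h] at ih
      dsimp only at ih ⊢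
      split_ifs at ih ⊢ with h1
      · exact congrArg _ ih
      · rw [List.cons_append]; exact congrArg _ ih

-- consuming a block: A's in_block phase is takeWhile/drop
lemma block_phase (ls : List String) (t : Int) (lines : List String)
    (out : List (Int × Int × List String)) :
    pvFinal (ls.foldl pvStripStep (true, some t, lines, out)) =
    pvFinal ((ls.drop (ls.takeWhile (fun x => x ≠ "")).length).foldl pvStripStep
      (false, some t, lines ++ ls.takeWhile (fun x => x ≠ ""), out)) := by
  induction ls generalizing lines with
  | nil => simp [pvFinal]
  | cons l ls ih =>
    by_cases h : l = ""
    · subst h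
      have h2 : pv_str2seconds "" = none := by decide
      have htw : (("" :: ls).takeWhile (fun x => x ≠ "")) = [] := by
        simp
      rw [htw]
      simp only [List.length_nil, List.drop_zero, List.append_nil, List.foldl_cons]
      have e1 : pvStripStep (true, some t, lines, out) "" = (false, some t, lines, out) := by
        simp [pvStripStep]
      have e2 : pvStripStep (false, some t, lines, out) "" = (false, some t, lines, out) := by
        simp [pvStripStep, h2]
      rw [e1, e2]
    · have hs : pvStripStep (true, some t, lines, out) l = (true, some t, lines ++ [l], out) := by
        simp [pvStripStep, h]
      simp only [List.foldl_cons, hs]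
      rw [ih (lines ++ [l])]
      have htw : (l :: ls).takeWhile (fun x => x ≠ "") = l :: ls.takeWhile (fun x => x ≠ "") := by
        simp [h]
      rw [htw]
      simp [List.append_assoc]

def pvStNB : Option (Int × List String) → List (Int × Int × List String) →
    Bool × Option Int × List String × List (Int × Int × List String)
  | none, out => (false, none, [], out)
  | some (t, l), out => (false, some t, l, out)

def pvPendList : Option (Int × List String) → List (Int × List String)
  | none => []
  | some p => [p]

-- the main invariant: from any between-blocks state, A's remaining run yields pvFinish of the
-- pending record (if any) followed by B's records of the remaining lines
lemma main_inv : ∀ (n : Nat) (ls : List String), ls.length ≤ n →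
    ∀ (pend : Option (Int × List String)) (out : List (Int × Int × List String)),
    pvFinal (ls.foldl pvStripStep (pvStNB pend out)) =
    out ++ pvFinish (pvPendList pend ++ pvRecords ls) := by
  intro n
  induction n with
  | zero =>
    intro ls hls pend out
    have : ls = [] := List.eq_nil_of_length_eq_zero (Nat.le_zero.mp hls)
    subst this
    cases pend with
    | none => simp [pvFinal, pvStNB, pvPendList, pvRecords_nil, pvFinish]
    | some p =>
      rcases p with ⟨t, l⟩
      simp only [pvStNB, pvPendList, pvRecords_nil, List.foldl_nil, pvFinal, pvFinish, List.append_nil]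
      split_ifs <;> simp
  | succ n ih =>
    intro ls hls pend out
    cases ls with
    | nil =>
      cases pend with
      | none => simp [pvFinal, pvStNB, pvPendList, pvRecords_nil, pvFinish]
      | some p =>
        rcases p with ⟨t, l⟩
        simp only [pvStNB, pvPendList, pvRecords_nil, List.foldl_nil, pvFinal, pvFinish, List.append_nil]
        split_ifs <;> simp
    | cons l ls =>
      have hstep : ∀ out', pvStripStep (pvStNB pend out') l =
          match pv_str2seconds l with
          | none => pvStNB pend out'
          | some tc => (true, some tc, [],
              match pend with
              | some (ts, pl) => out' ++ [(ts, tc, pl)]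
              | none => out') := by
        intro out'
        cases pend with
        | none => simp [pvStNB, pvStripStep]
        | some p => rcases p with ⟨t0, l0⟩; simp [pvStNB, pvStripStep]
      cases hA : pv_str2seconds l with
      | none =>
        simp only [List.foldl_cons, hstep, hA]
        rw [ih ls (by simp only [List.length_cons] at hls; omega) pend out,
          pvRecords_cons_none l ls hA]
      | some tc =>
        simp only [List.foldl_cons, hstep, hA]
        have hblk := block_phase ls tc []
        set tw := ls.takeWhile (fun x => x ≠ "") with htw
        set rest := ls.drop tw.length with hrest
        have hlen : rest.length ≤ n := by
          have h1 : rest.length ≤ ls.length := by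
            rw [hrest]; simp [List.length_drop]
          have h2 : ls.length ≤ n := by simpa using Nat.succ_le_succ_iff.mp (by simpa using hls)
          omega
        cases pend with
        | none =>
          rw [hblk out]
          have : (false, some tc, [] ++ tw, out) = pvStNB (some (tc, tw)) out := by
            simp [pvStNB]
          rw [this, ih rest hlen (some (tc, tw)) out,
            pvRecords_cons_some l ls tc hA, ← htw, ← hrest]
          simp [pvPendList]
        | some p =>
          rcases p with ⟨ts, pl⟩
          rw [hblk (out ++ [(ts, tc, pl)])]
          have : (false, some tc, [] ++ tw, out ++ [(ts, tc, pl)]) =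
              pvStNB (some (tc, tw)) (out ++ [(ts, tc, pl)]) := by simp [pvStNB]
          rw [this, ih rest hlen (some (tc, tw)) (out ++ [(ts, tc, pl)]),
            pvRecords_cons_some l ls tc hA, ← htw, ← hrest]
          simp only [pvPendList, pvFinish, List.append_assoc,
            List.cons_append, List.nil_append]

-- ===== VERDICT (by name: the statement is the Claim_ definition above) =====
theorem transcribe_txt_file_to_structured_iter_spec : Claim_equal_transcribe_txt_file_to_structured_iter := by
  intro file_input _
  unfold Spec_transcribe_txt_file_to_structured_iter
  have hA : transcribe_txt_file_to_structured_iter file_input =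
      pvFinal ((file_input.map PySem.Str.rstrip).foldl pvStripStep (false, none, [], [])) := by
    unfold transcribe_txt_file_to_structured_iter
    rw [List.foldl_map]
    rfl
  have hB : transcribe_txt_file_to_structured_iter_alt file_input =
      pvFinish (pvRecords (file_input.map PySem.Str.rstrip)) := by
    unfold transcribe_txt_file_to_structured_iter_alt
    exact alt_assemble_eq _
  have h1 := main_inv (file_input.map PySem.Str.rstrip).length (file_input.map PySem.Str.rstrip)
    (Nat.le_refl _) none []
  simp only [pvStNB, pvPendList, List.nil_append] at h1
  rw [hA, hB, h1]
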